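-- pv_equiv track=rewrite | github.com/SahilVankudre/tf_scraper_cleaner | terraform_data_cleaner.py | standardize_formatting
-- ===== SOURCE A (Python) =====
-- def standardize_formatting(content: str) -> str:
--     """Normalize whitespace, indentation, blank lines."""
--     # Tabs → 2 spaces
--     content = content.replace('\t', '  ')
--
--     # Remove trailing whitespace per line
--     lines = [l.rstrip() for l in content.splitlines()]
--
--     # Collapse multiple blank lines into one
--     cleaned, prev_blank = [], False
--     for line in lines:
--         blank = not line.strip()
--         if blank and prev_blank:
--             continue
--         cleaned.append(line)
--         prev_blank = blank
--
--     # Strip leading/trailing blank lines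
--     while cleaned and not cleaned[0].strip():
--         cleaned.pop(0)
--     while cleaned and not cleaned[-1].strip():
--         cleaned.pop()
--
--     return '\n'.join(cleaned)
-- ===== SOURCE B (Python) =====
-- def standardize_formatting(content: str) -> str:
--     """Normalize whitespace, indentation, blank lines (single deferred-emission pass)."""
--     result = []
--     seen_content = False
--     pending_blank = False
--     for line in content.replace('\t', '  ').splitlines():
--         stripped = line.rstrip()
--         if not stripped.strip():
--             if seen_content:
--                 pending_blank = True
--         else:
--             if pending_blank:
--                 result.append('')
--                 pending_blank = False
--             result.append(stripped)
--             seen_content = True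
--     return '\n'.join(result)
-- ===== Notes on version B (the rewrite author's own statement) =====
-- stated objective: simpler
-- what changed: A's four phases (rstrip map, blank-collapse loop, two trimming while-loops) are merged into one forward pass with deferred blank emission: a blank line only sets a pending flag once content was seen, and the flag is flushed as a single blank line before the next content line, so leading/trailing blanks and blank runs never enter the output.
import Mathlib
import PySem

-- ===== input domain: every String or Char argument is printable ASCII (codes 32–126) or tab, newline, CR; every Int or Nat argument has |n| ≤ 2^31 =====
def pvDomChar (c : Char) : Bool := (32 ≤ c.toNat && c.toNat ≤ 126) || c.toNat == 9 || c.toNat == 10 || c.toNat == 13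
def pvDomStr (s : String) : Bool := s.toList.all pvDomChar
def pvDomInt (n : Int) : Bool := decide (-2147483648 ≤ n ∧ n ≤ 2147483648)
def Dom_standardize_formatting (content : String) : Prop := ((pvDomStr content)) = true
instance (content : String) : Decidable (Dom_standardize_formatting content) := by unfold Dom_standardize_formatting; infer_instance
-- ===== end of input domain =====

-- B replaces A's four phases (rstrip map, blank-collapse loop, two trimming while-loops)
-- by one forward pass with deferred blank emission; objective: simpler.

-- ===== PORT A =====
def standardize_formatting (content : String) : String :=
  -- content = content.replace('\t', '  ')
  let content := PySem.Str.replace content "\t" "  "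
  -- lines = [l.rstrip() for l in content.splitlines()]
  let lines := (PySem.Str.splitlines content).map (fun l => PySem.Str.rstrip l)
  -- cleaned, prev_blank = [], False; for line in lines: …
  let cp := lines.foldl (fun (st : List String × Bool) line =>
      let blank := PySem.Str.strip line == ""
      if blank && st.2 then st else (st.1 ++ [line], blank)) ([], false)
  -- while cleaned and not cleaned[0].strip(): cleaned.pop(0)
  let cleaned := cp.1.dropWhile (fun l => PySem.Str.strip l == "")
  -- while cleaned and not cleaned[-1].strip(): cleaned.pop()
  let cleaned := (cleaned.reverse.dropWhile (fun l => PySem.Str.strip l == "")).reverse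
  PySem.Str.join "\n" cleaned

-- ===== PORT B =====
def standardize_formatting_alt (content : String) : String :=
  -- single pass, state = (result, seen_content, pending_blank)
  let st := (PySem.Str.splitlines (PySem.Str.replace content "\t" "  ")).foldl
    (fun (st : List String × Bool × Bool) line =>
      let stripped := PySem.Str.rstrip line
      if PySem.Str.strip stripped == "" then
        if st.2.1 then (st.1, st.2.1, true) else st
      else
        ((if st.2.2 then st.1 ++ [""] else st.1) ++ [stripped], true, false))
    ([], false, false)
  PySem.Str.join "\n" st.1

-- ===== PRECONDITION & SPEC =====
def Spec_standardize_formatting (content : String) (out : String) : Prop := out = standardize_formatting_alt content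
instance (content : String) (out : String) : Decidable (Spec_standardize_formatting content out) := by unfold Spec_standardize_formatting; infer_instance

-- ===== CLAIM (what is proved, stated in full; the proofs are below) =====
def Claim_equal_standardize_formatting : Prop := ∀ (content : String), Dom_standardize_formatting content → Spec_standardize_formatting content (standardize_formatting content)

-- ===== LEMMAS AND PROOFS =====

-- A list ending in a non-space character is unchanged by rstrip.
theorem rstrip_append_nonspace (fs : List Char) (d : Char) (hd : PySem.Chars.isspace d = false) :
    PySem.Chars.rstrip (fs ++ [d]) = fs ++ [d] := by
  unfold PySem.Chars.rstrip
  rw [List.reverse_append, List.reverse_singleton, List.singleton_append,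
    List.dropWhile_cons_of_neg (by simp [hd])]
  simp

-- If strip of an already-rstripped list is empty, the rstripped list was empty.
theorem strip_rstrip_chars (cs : List Char) (h : PySem.Chars.strip (PySem.Chars.rstrip cs) = []) :
    PySem.Chars.rstrip cs = [] := by
  by_contra hne
  rcases e : List.dropWhile PySem.Chars.isspace cs.reverse with _ | ⟨d, t⟩
  · exact hne (by simp [PySem.Chars.rstrip, e])
  · have hd : PySem.Chars.isspace d = false := by
      have hw : List.dropWhile PySem.Chars.isspace cs.reverse ≠ [] := by simp [e]
      have := List.head_dropWhile_not PySem.Chars.isspace hw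
      simpa [e] using this
    have hds : PySem.Chars.rstrip cs = t.reverse ++ [d] := by
      simp [PySem.Chars.rstrip, e]
    rw [hds] at h
    unfold PySem.Chars.strip PySem.Chars.lstrip at h
    rw [List.dropWhile_append] at h
    by_cases hemp : (List.dropWhile PySem.Chars.isspace t.reverse).isEmpty
    · rw [if_pos hemp] at h
      rw [List.dropWhile_cons_of_neg (by simp [hd])] at h
      rw [show ([d] : List Char) = [] ++ [d] by simp, rstrip_append_nonspace _ _ hd] at h
      simp at h
    · rw [if_neg hemp] at h
      rw [rstrip_append_nonspace _ _ hd] at h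
      simp at h

-- A rstripped line is whitespace-only iff it is empty.
theorem strip_rstrip_key (s : String) :
    (PySem.Str.strip (PySem.Str.rstrip s) == "") = (PySem.Str.rstrip s == "") := by
  apply Bool.eq_iff_iff.mpr
  simp only [beq_iff_eq]
  constructor
  · intro h
    have h' : (PySem.Str.strip (PySem.Str.rstrip s)).toList = [] := by rw [h]; rfl
    rw [PySem.Str.toList_strip, PySem.Str.toList_rstrip] at h'
    have h2 : (PySem.Str.rstrip s).toList = ("" : String).toList :=
      (PySem.Str.toList_rstrip s).trans (strip_rstrip_chars s.toList h')
    exact String.toList_inj.mp h2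
  · intro h; rw [h]; rfl

-- proof-side recursive form of A's collapse loop (blank test reduced to (· == ""))
def colA : List String → Bool → List String
  | [], _ => []
  | l :: ls, prev => if l == "" && prev then colA ls prev else l :: colA ls (l == "")

-- proof-side recursive form of A's trailing trim (drop the maximal blank suffix)
def dTr : List String → List String
  | [] => []
  | l :: xs => if (dTr xs).isEmpty && l == "" then [] else l :: dTr xs

-- proof-side recursive form of B's loop once content was seen (argument = pending_blank)
def bfB : List String → Bool → List String
  | [], _ => []
  | l :: ls, pending =>
      if l == "" then bfB ls true
      else if pending then "" :: l :: bfB ls false else l :: bfB ls false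

-- proof-side recursive form of B's loop before content was seen
def bf0 : List String → List String
  | [] => []
  | l :: ls => if l == "" then bf0 ls else l :: bfB ls false

-- A's loop body with the blank test already pushed through rstrip
def fA (st : List String × Bool) (x : String) : List String × Bool :=
  if (PySem.Str.rstrip x == "") && st.2 then st
  else (st.1 ++ [PySem.Str.rstrip x], PySem.Str.rstrip x == "")

-- B's loop body with the blank test already pushed through rstrip
def fB (st : List String × Bool × Bool) (x : String) : List String × Bool × Bool :=
  if PySem.Str.rstrip x == "" then (if st.2.1 then (st.1, st.2.1, true) else st)
  else ((if st.2.2 then st.1 ++ [""] else st.1) ++ [PySem.Str.rstrip x], true, false)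

theorem foldA' (raw : List String) (acc : List String) (prev : Bool) :
    (raw.foldl fA (acc, prev)).1 = acc ++ colA (raw.map (fun l => PySem.Str.rstrip l)) prev := by
  induction raw generalizing acc prev with
  | nil => simp [colA]
  | cons l t ih =>
    simp only [List.map_cons, List.foldl_cons, colA, fA]
    by_cases h : (PySem.Str.rstrip l == "") && prev
    · simp only [h, if_true, ih]
    · simp only [h, if_false, ih]
      simp at h
      simp [h]

theorem foldB' (raw : List String) (acc : List String) (pending : Bool) :
    (raw.foldl fB (acc, true, pending)).1 = acc ++ bfB (raw.map (fun l => PySem.Str.rstrip l)) pending := by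
  induction raw generalizing acc pending with
  | nil => simp [bfB]
  | cons l t ih =>
    simp only [List.map_cons, List.foldl_cons, bfB, fB]
    by_cases h : PySem.Str.rstrip l == ""
    · simp only [h, if_true, ih]
    · by_cases hp : pending <;> simp [h, hp, ih]

theorem foldB0 (raw : List String) :
    (raw.foldl fB ([], false, false)).1 = bf0 (raw.map (fun l => PySem.Str.rstrip l)) := by
  induction raw with
  | nil => simp [bf0]
  | cons l t ih =>
    simp only [List.map_cons, List.foldl_cons, bf0, fB]
    by_cases h : PySem.Str.rstrip l == ""
    · simp only [h, if_true]
      simpa using ih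
    · simp only [h, if_false]
      have := foldB' t [PySem.Str.rstrip l] false
      simp [this]

-- dropWhile only looks at members, so predicates agreeing on members may be exchanged
theorem dropWhile_congr_mem (p q : String → Bool) : ∀ (l : List String), (∀ x ∈ l, p x = q x) →
    l.dropWhile p = l.dropWhile q
  | [], _ => rfl
  | x :: xs, h => by
    have hx := h x (by simp)
    by_cases hp : p x
    · rw [List.dropWhile_cons_of_pos hp, List.dropWhile_cons_of_pos (by rw [← hx]; exact hp)]
      exact dropWhile_congr_mem p q xs (fun y hy => h y (by simp [hy]))
    · rw [List.dropWhile_cons_of_neg hp, List.dropWhile_cons_of_neg (by rw [← hx]; exact hp)]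

theorem mem_colA {l : String} : ∀ ls prev, l ∈ colA ls prev → l ∈ ls := by
  intro ls
  induction ls with
  | nil => intro prev h; simp [colA] at h
  | cons a t ih =>
    intro prev h
    simp only [colA] at h
    by_cases hc : (a == "") && prev
    · simp only [hc, if_true] at h
      exact List.mem_cons_of_mem _ (ih _ h)
    · simp only [hc, if_false] at h
      rcases List.mem_cons.1 h with h | h
      · exact h ▸ List.mem_cons_self
      · exact List.mem_cons_of_mem _ (ih _ h)

-- the port's reverse/dropWhile/reverse trailing trim is dTr
theorem dTr_eq (xs : List String) :
    (xs.reverse.dropWhile (· == "")).reverse = dTr xs := by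
  induction xs with
  | nil => rfl
  | cons l t ih =>
    simp only [List.reverse_cons, List.dropWhile_append, dTr]
    by_cases h : (dTr t).isEmpty
    · have ht : (t.reverse.dropWhile (· == "")) = [] := by
        rcases e : t.reverse.dropWhile (· == "") with _|⟨a,b⟩
        · rfl
        · rw [e] at ih; rw [← ih] at h; simp at h
      have hdt : dTr t = [] := by rwa [List.isEmpty_iff] at h
      by_cases hl : l == ""
      · simp [ht, hl, hdt, List.dropWhile]
      · simp [ht, hl, hdt, List.dropWhile]
    · rw [List.isEmpty_iff] at h
      have ht : t.reverse.dropWhile (· == "") ≠ [] := by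
        intro e; rw [e] at ih; exact h ih.symm
      simp [ht, h, ih]

-- deferred emission = eager emission + trailing trim
theorem core_PQ (ls : List String) :
    bfB ls false = dTr (colA ls false) ∧ bfB ls true = dTr ("" :: colA ls true) := by
  induction ls with
  | nil => constructor <;> simp [bfB, colA, dTr]
  | cons l t ih =>
    obtain ⟨P, Q⟩ := ih
    by_cases hl : l == ""
    · have hl' : l = "" := by simpa using hl
      subst hl'
      constructor
      · simp [bfB, colA, Q]
      · simp [bfB, colA, Q]
    · have hdtr : ∀ X, dTr (l :: X) = l :: dTr X := by intro X; simp [dTr, hl]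
      constructor
      · simp [bfB, colA, hl, P, hdtr]
      · simp [bfB, colA, hl, P, Q, hdtr, dTr]

-- B's whole pass = A's collapse + leading trim + trailing trim
theorem core_R (ls : List String) :
    bf0 ls = dTr ((colA ls true).dropWhile (· == "")) := by
  induction ls with
  | nil => simp [bf0, colA, dTr]
  | cons l t ih =>
    by_cases hl : l == ""
    · have hl' : l = "" := by simpa using hl
      subst hl'
      simp [bf0, colA, ih]
    · simp only [bf0, colA, hl, Bool.false_and, Bool.and_self, if_false]
      rw [if_neg (by simp), if_neg (by simp)]
      rw [List.dropWhile_cons_of_neg (by simpa using hl)]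
      rw [(core_PQ t).1]
      simp [dTr, hl]

-- after the leading trim, the initial prev_blank flag is irrelevant
theorem dropLeading_colA (ls : List String) :
    (colA ls false).dropWhile (· == "") = (colA ls true).dropWhile (· == "") := by
  cases ls with
  | nil => rfl
  | cons l t =>
    by_cases hl : l == ""
    · have hl' : l = "" := by simpa using hl
      subst hl'
      simp [colA, List.dropWhile_cons_of_pos]
    · simp [colA, hl]

-- the two loop bodies as they appear in the ports, named for `change`
def pS (l : String) : Bool := PySem.Str.strip l == ""

def gA (st : List String × Bool) (line : String) : List String × Bool :=
  if pS line && st.2 then st else (st.1 ++ [line], pS line)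

def gB (st : List String × Bool × Bool) (line : String) : List String × Bool × Bool :=
  if pS (PySem.Str.rstrip line) then
    if st.2.1 then (st.1, st.2.1, true) else st
  else ((if st.2.2 then st.1 ++ [""] else st.1) ++ [PySem.Str.rstrip line], true, false)

theorem foldGA (raw : List String) (acc : List String) (prev : Bool) :
    List.foldl gA (acc, prev) (raw.map (fun l => PySem.Str.rstrip l)) = List.foldl fA (acc, prev) raw := by
  rw [List.foldl_map]
  exact PySem.List.foldl_congr_mem raw _ _ _
    (fun acc x _ => by simp only [gA, fA, pS, strip_rstrip_key])

theorem foldGB (raw : List String) :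
    List.foldl gB ([], false, false) raw = List.foldl fB ([], false, false) raw :=
  PySem.List.foldl_congr_mem raw _ _ _
    (fun acc x _ => by simp only [gB, fB, pS, strip_rstrip_key])

-- ===== VERDICT (by name: the statement is the Claim_ definition above) =====
theorem standardize_formatting_spec : Claim_equal_standardize_formatting := by
  intro content _
  unfold Spec_standardize_formatting standardize_formatting standardize_formatting_alt
  set raw := PySem.Str.splitlines (PySem.Str.replace content "\t" "  ") with hraw
  change PySem.Str.join "\n"
      ((((List.foldl gA ([], false) (raw.map (fun l => PySem.Str.rstrip l))).1.dropWhile pS).reverse.dropWhile pS).reverse)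
    = PySem.Str.join "\n" (List.foldl gB ([], false, false) raw).1
  rw [foldGA, foldGB, foldB0]
  set lines := raw.map (fun l => PySem.Str.rstrip l) with hlines
  rw [show (List.foldl fA ([], false) raw).1 = colA lines false by
    rw [foldA' raw [] false]; simp [hlines]]
  have hmemP : ∀ x ∈ lines, pS x = (x == "") := by
    intro x hx
    rw [hlines] at hx
    rcases List.mem_map.1 hx with ⟨s, _, rfl⟩
    exact strip_rstrip_key s
  have h1 : (colA lines false).dropWhile pS = (colA lines false).dropWhile (· == "") :=
    dropWhile_congr_mem _ _ _ (fun x hx => hmemP x (mem_colA _ _ hx))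
  have h2 : ((colA lines false).dropWhile (· == "")).reverse.dropWhile pS
      = ((colA lines false).dropWhile (· == "")).reverse.dropWhile (· == "") := by
    apply dropWhile_congr_mem
    intro x hx
    exact hmemP x (mem_colA _ _ ((List.dropWhile_sublist _).mem (List.mem_reverse.1 hx)))
  rw [h1, h2, dTr_eq, dropLeading_colA, ← core_R]
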